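-- pv_equiv track=rewrite | github.com/gnglolapp-design/webhooks | scripts/lib/utils.py | clean_lines
-- ===== SOURCE A (Python) =====
-- from typing import Any, Dict, List
--
-- def clean_lines(text: str) -> str:
--     lines = [ln.strip() for ln in (text or "").splitlines()]
--     out: List[str] = []
--     for ln in lines:
--         if not ln:
--             if out and out[-1] == "":
--                 continue
--             out.append("")
--         else:
--             out.append(ln)
--     return "\n".join(out).strip()
-- ===== SOURCE B (Python) =====
-- def clean_lines(text: str) -> str:
--     # Group stripped non-blank lines into paragraphs; blank lines only end a
--     # paragraph.  Paragraphs joined with a single blank line ("\n\n") gives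
--     # exactly "at most one blank line between content, none at the ends".
--     paras = []
--     cur = []
--     for ln in (text or "").splitlines():
--         s = ln.strip()
--         if s:
--             cur.append(s)
--         elif cur:
--             paras.append(cur)
--             cur = []
--     if cur:
--         paras.append(cur)
--     return "\n\n".join("\n".join(p) for p in paras)
-- ===== Notes on version B (the rewrite author's own statement) =====
-- stated objective: idiomatic
-- what changed: Replaces the stateful accumulator loop that peeks at the last emitted element to suppress repeated blank lines (plus a final join-and-strip) with a paragraph grouping: runs of non-blank stripped lines are collected into paragraphs and the paragraphs are joined with a single blank separator line, so no blank-suppression state and no final strip are needed.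
import Mathlib
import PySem

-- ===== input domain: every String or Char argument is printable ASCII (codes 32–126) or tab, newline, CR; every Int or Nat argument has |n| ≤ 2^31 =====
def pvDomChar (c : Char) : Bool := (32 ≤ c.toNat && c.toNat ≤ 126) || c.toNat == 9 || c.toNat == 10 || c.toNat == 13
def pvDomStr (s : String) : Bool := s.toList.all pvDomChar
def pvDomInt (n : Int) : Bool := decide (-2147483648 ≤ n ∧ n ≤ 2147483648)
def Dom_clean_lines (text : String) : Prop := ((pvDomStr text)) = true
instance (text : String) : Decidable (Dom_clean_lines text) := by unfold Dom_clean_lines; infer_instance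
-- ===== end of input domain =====

-- B replaces A's stateful blank-suppression loop (peeking at out[-1]) + final strip by
-- grouping non-blank lines into paragraphs joined with "\n\n" (objective: more idiomatic).

-- ===== PORT A =====
-- the 'for ln in lines' loop with accumulator 'out'
def cleanLoopA : List String → List String → List String
  | out, [] => out
  | out, ln :: rest =>
    if ln = "" then
      if out ≠ [] ∧ out.getLast? = some "" then cleanLoopA out rest
      else cleanLoopA (out ++ [""]) rest
    else cleanLoopA (out ++ [ln]) rest

def clean_lines (text : String) : String :=
  let lines := (PySem.Str.splitlines (if text = "" then "" else text)).map PySem.Str.strip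
  PySem.Str.strip (PySem.Str.join "\n" (cleanLoopA [] lines))

-- ===== PORT B =====
-- the 'for ln in …' loop with accumulators 'paras'/'cur', plus the trailing 'if cur' append
def cleanLoopB : List (List String) → List String → List String → List (List String)
  | paras, cur, [] => if cur = [] then paras else paras ++ [cur]
  | paras, cur, ln :: rest =>
    let s := PySem.Str.strip ln
    if s = "" then
      if cur = [] then cleanLoopB paras [] rest
      else cleanLoopB (paras ++ [cur]) [] rest
    else cleanLoopB paras (cur ++ [s]) rest

def clean_lines_alt (text : String) : String :=
  PySem.Str.join "\n\n"
    ((cleanLoopB [] [] (PySem.Str.splitlines (if text = "" then "" else text))).map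
      (PySem.Str.join "\n"))

-- ===== PRECONDITION & SPEC =====
def Spec_clean_lines (text : String) (out : String) : Prop := out = clean_lines_alt text
instance (text : String) (out : String) : Decidable (Spec_clean_lines text out) := by unfold Spec_clean_lines; infer_instance

-- ===== CLAIM (what is proved, stated in full; the proofs are below) =====
def Claim_equal_clean_lines : Prop := ∀ (text : String), Dom_clean_lines text → Spec_clean_lines text (clean_lines text)

-- ===== LEMMAS AND PROOFS =====

-- blank-line test, join with "\n", and the two pure shapes of the loops, over List Char
def isBlank (l : List Char) : Bool := decide (l = [])
def njoin (M : List (List Char)) : List Char := List.intercalate ['\n'] M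
def dropLeadB (M : List (List Char)) : List (List Char) := M.dropWhile isBlank
def dropTrailB (M : List (List Char)) : List (List Char) := (M.reverse.dropWhile isBlank).reverse

-- A's loop, purely: collapse runs of blanks (b = "a blank was just emitted")
def collapseC : Bool → List (List Char) → List (List Char)
  | _, [] => []
  | b, l :: rest =>
    if l = [] then (if b then collapseC true rest else [] :: collapseC true rest)
    else l :: collapseC false rest

-- B's loop, purely: group non-blank lines into paragraphs
def grpC : List (List Char) → List (List Char) → List (List (List Char))
  | cur, [] => if cur = [] then [] else [cur]
  | cur, l :: rest =>
    if l = [] then (if cur = [] then grpC [] rest else cur :: grpC [] rest)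
    else grpC (cur ++ [l]) rest

theorem collapseC_false_blank (rest : List (List Char)) :
    collapseC false ([] :: rest) = [] :: collapseC true rest := by simp [collapseC]
theorem collapseC_true_blank (rest : List (List Char)) :
    collapseC true ([] :: rest) = collapseC true rest := by simp [collapseC]
theorem collapseC_nonblank (b : Bool) (l : List Char) (rest : List (List Char)) (hl : l ≠ []) :
    collapseC b (l :: rest) = l :: collapseC false rest := by simp [collapseC, hl]
theorem grpC_blank (cur : List (List Char)) (rest : List (List Char)) (hc : cur ≠ []) :
    grpC cur ([] :: rest) = cur :: grpC [] rest := by simp [grpC, hc]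
theorem grpC_blank_nil (rest : List (List Char)) :
    grpC [] ([] :: rest) = grpC [] rest := by simp [grpC]
theorem grpC_nonblank (cur : List (List Char)) (l : List Char) (rest : List (List Char))
    (hl : l ≠ []) : grpC cur (l :: rest) = grpC (cur ++ [l]) rest := by simp [grpC, hl]
theorem dropLeadB_blank_cons (Y : List (List Char)) : dropLeadB ([] :: Y) = dropLeadB Y := by
  unfold dropLeadB
  rw [List.dropWhile_cons_of_pos (by simp [isBlank])]
theorem lstrip_cons_nl (X : List Char) :
    PySem.Chars.lstrip ('\n' :: X) = PySem.Chars.lstrip X := by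
  unfold PySem.Chars.lstrip
  rw [List.dropWhile_cons_of_pos (by decide)]

def headOK (l : List Char) : Prop := ∀ c, l.head? = some c → PySem.Chars.isspace c = false
def lastOK (l : List Char) : Prop := ∀ c, l.getLast? = some c → PySem.Chars.isspace c = false

theorem cleanLoopA_eq (ls : List String) : ∀ out,
    (cleanLoopA out ls).map String.toList
      = out.map String.toList ++ collapseC (decide (out.getLast? = some "")) (ls.map String.toList) := by
  induction ls with
  | nil => intro out; simp [cleanLoopA, collapseC]
  | cons ln rest ih =>
    intro out
    by_cases h : ln = ""
    · subst h
      by_cases h2 : out.getLast? = some ""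
      · have hne : out ≠ [] := by intro h0; subst h0; simp at h2
        simp [cleanLoopA, hne, h2, collapseC, ih]
      · by_cases hne : out = []
        · subst hne
          simp [cleanLoopA, collapseC, ih]
        · rw [show cleanLoopA out ("" :: rest) = cleanLoopA (out ++ [""]) rest from by
              simp [cleanLoopA, h2]]
          rw [ih]
          simp [collapseC, h2]
      -- both use getLast? (out ++ [""]) = some ""
    · have h' : ln.toList ≠ [] := by simpa [String.toList_eq_nil_iff] using h
      rw [show cleanLoopA out (ln :: rest) = cleanLoopA (out ++ [ln]) rest from by
            simp [cleanLoopA, h]]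
      rw [ih]
      simp [collapseC, h', h]

theorem cleanLoopB_eq (ls : List String) : ∀ paras cur,
    (cleanLoopB paras cur ls).map (List.map String.toList)
      = paras.map (List.map String.toList)
        ++ grpC (cur.map String.toList) (ls.map (fun s => PySem.Chars.strip s.toList)) := by
  induction ls with
  | nil =>
    intro paras cur
    by_cases h : cur = [] <;> simp [cleanLoopB, grpC, h]
  | cons ln rest ih =>
    intro paras cur
    by_cases h : PySem.Str.strip ln = ""
    · have h' : PySem.Chars.strip ln.toList = [] := by
        rw [← PySem.Str.toList_strip, h]; rfl
      by_cases hc : cur = []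
      · subst hc; simp [cleanLoopB, h, h', grpC, ih]
      · have hc' : cur.map String.toList ≠ [] := by simpa using hc
        simp [cleanLoopB, h, h', hc, hc', grpC, ih]
    · have h' : PySem.Chars.strip ln.toList ≠ [] := by
        intro hx
        apply h
        rw [← PySem.Str.toList_strip] at hx
        exact String.toList_eq_nil_iff.mp hx
      simp [cleanLoopB, h, h', grpC, ih, PySem.Str.toList_strip]

-- ---- facts about strip outputs: no whitespace at either end ----
theorem headOK_dropWhile (s : List Char) : headOK (s.dropWhile PySem.Chars.isspace) := by
  induction s with
  | nil => intro c hc; simp at hc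
  | cons a s ih =>
    intro c hc
    by_cases h : PySem.Chars.isspace a
    · exact ih c (by simpa [List.dropWhile_cons_of_pos h] using hc)
    · rw [List.dropWhile_cons_of_neg (by simp [h])] at hc
      simp only [List.head?_cons, Option.some.injEq] at hc
      subst hc; simpa using h

theorem head?_of_prefix {u t : List Char} (h : u <+: t) {c : Char} (hc : u.head? = some c) :
    t.head? = some c := by
  obtain ⟨w, rfl⟩ := h
  cases u with
  | nil => simp at hc
  | cons a u => simp_all

theorem headOK_strip (s : List Char) : headOK (PySem.Chars.strip s) := by
  intro c hc
  have hpre : PySem.Chars.strip s <+: PySem.Chars.lstrip s := by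
    unfold PySem.Chars.strip PySem.Chars.rstrip
    have := List.reverse_prefix.mpr
      (List.dropWhile_suffix (l := (PySem.Chars.lstrip s).reverse) PySem.Chars.isspace)
    simpa using this
  exact headOK_dropWhile s c (head?_of_prefix hpre hc)

theorem lastOK_strip (s : List Char) : lastOK (PySem.Chars.strip s) := by
  intro c hc
  unfold PySem.Chars.strip PySem.Chars.rstrip at hc
  rw [List.getLast?_reverse] at hc
  exact headOK_dropWhile _ c hc

theorem lastOK_nil : lastOK [] := by intro c hc; simp at hc
theorem headOK_nil : headOK [] := by intro c hc; simp at hc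

-- ---- njoin facts ----
theorem njoin_nil : njoin [] = [] := by simp [njoin, List.intercalate]
theorem njoin_single (a : List Char) : njoin [a] = a := by simp [njoin, List.intercalate]

theorem njoin_cons_cons (l b : List Char) (rest : List (List Char)) :
    njoin (l :: b :: rest) = l ++ '\n' :: njoin (b :: rest) := by
  simp [njoin, List.intercalate]

theorem njoin_append (A B : List (List Char)) (hB : B ≠ []) :
    njoin (A ++ B) = if A = [] then njoin B else njoin A ++ '\n' :: njoin B := by
  induction A with
  | nil => simp
  | cons a A ih =>
    obtain ⟨b, B', rfl⟩ := List.exists_cons_of_ne_nil hB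
    cases A with
    | nil => simp [njoin_cons_cons, njoin_single]
    | cons a' A' =>
      rw [List.cons_append, List.cons_append, njoin_cons_cons, ← List.cons_append, ih]
      simp [njoin_cons_cons]

theorem intercalate_cons_cons {α : Type} (sep a b : List α) (l : List (List α)) :
    List.intercalate sep (a :: b :: l) = a ++ sep ++ List.intercalate sep (b :: l) := by
  simp [List.intercalate]

theorem intercalate_single {α : Type} (sep a : List α) : List.intercalate sep [a] = a := by
  simp [List.intercalate]

theorem njoin_reverse (M : List (List Char)) :
    (njoin M).reverse = njoin (M.reverse.map List.reverse) := by
  induction M with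
  | nil => simp [njoin, List.intercalate]
  | cons l rest ih =>
    cases rest with
    | nil => simp [njoin_single]
    | cons r rs =>
      have hA : (r :: rs).reverse.map List.reverse ≠ [] := by simp
      rw [njoin_cons_cons,
          show ((l :: r :: rs).reverse.map List.reverse)
            = (r :: rs).reverse.map List.reverse ++ [l.reverse] from by simp,
          njoin_append _ _ (by simp), if_neg hA, njoin_single, ← ih]
      simp

-- lstrip of a join of head-clean lines drops exactly the leading blank lines
theorem lstrip_njoin (M : List (List Char)) (h : ∀ l ∈ M, headOK l) :
    PySem.Chars.lstrip (njoin M) = njoin (dropLeadB M) := by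
  induction M with
  | nil => simp [njoin_nil, dropLeadB, PySem.Chars.lstrip]
  | cons l rest ih =>
    by_cases hl : l = []
    · subst hl
      cases rest with
      | nil => simp [njoin_single, njoin_nil, dropLeadB, PySem.Chars.lstrip, isBlank]
      | cons r rs =>
        rw [njoin_cons_cons, List.nil_append, lstrip_cons_nl, dropLeadB_blank_cons]
        exact ih (fun x hx => h x (by simp [hx]))
    · obtain ⟨c, cs, rfl⟩ := List.exists_cons_of_ne_nil hl
      have hc : PySem.Chars.isspace c = false := h (c :: cs) (by exact List.mem_cons_self) c rfl
      have hd : dropLeadB ((c :: cs) :: rest) = (c :: cs) :: rest := by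
        unfold dropLeadB
        rw [List.dropWhile_cons_of_neg (by simp [isBlank])]
      cases rest with
      | nil =>
        rw [njoin_single, hd, njoin_single]
        simp [PySem.Chars.lstrip, hc]
      | cons r rs =>
        rw [njoin_cons_cons, hd, njoin_cons_cons]
        simp [PySem.Chars.lstrip, hc]

-- rstrip of a join of last-clean lines drops exactly the trailing blank lines
theorem rstrip_njoin (M : List (List Char)) (h : ∀ l ∈ M, lastOK l) :
    PySem.Chars.rstrip (njoin M) = njoin (dropTrailB M) := by
  have hOK : ∀ l ∈ M.reverse.map List.reverse, headOK l := by
    intro l hl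
    obtain ⟨m, hm, rfl⟩ := List.mem_map.mp hl
    intro c hc
    rw [List.head?_reverse] at hc
    exact h m (List.mem_reverse.mp hm) c hc
  have h3 : dropLeadB (M.reverse.map List.reverse) = (dropLeadB M.reverse).map List.reverse := by
    unfold dropLeadB
    rw [List.dropWhile_map]
    have hfun : (isBlank ∘ List.reverse : List Char → Bool) = isBlank := by
      funext l
      simp [isBlank, List.reverse_eq_nil_iff]
    rw [hfun]
  show (PySem.Chars.lstrip ((njoin M).reverse)).reverse = njoin (dropTrailB M)
  rw [njoin_reverse, lstrip_njoin _ hOK, h3, njoin_reverse]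
  unfold dropTrailB dropLeadB
  simp [List.map_map]

theorem strip_njoin (M : List (List Char)) (h : ∀ l ∈ M, headOK l ∧ lastOK l) :
    PySem.Chars.strip (njoin M) = njoin (dropTrailB (dropLeadB M)) := by
  show PySem.Chars.rstrip (PySem.Chars.lstrip (njoin M)) = _
  rw [lstrip_njoin M (fun l hl => (h l hl).1)]
  exact rstrip_njoin _ (fun l hl =>
    (h l (((List.dropWhile_sublist _).subset) hl)).2)

-- members of A's collapsed output are blank or original lines
theorem mem_collapseC {l : List Char} : ∀ (b : Bool) (L : List (List Char)),
    l ∈ collapseC b L → l = [] ∨ l ∈ L := by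
  intro b L
  induction L generalizing b with
  | nil => simp [collapseC]
  | cons x rest ih =>
    intro hmem
    by_cases hx : x = []
    · subst hx
      cases b with
      | true => rcases ih true (by simpa [collapseC_true_blank] using hmem) with h | h <;> simp [h]
      | false =>
        rw [collapseC_false_blank] at hmem
        rcases List.mem_cons.mp hmem with h | h
        · exact Or.inl h
        · rcases ih true h with h | h <;> simp [h]
    · rw [collapseC_nonblank _ _ _ hx] at hmem
      rcases List.mem_cons.mp hmem with h | h
      · exact Or.inr (by simp [h])
      · rcases ih false h with h2 | h2 <;> simp [h2]

-- collapseC true never starts with a blank, hence dropLeadB ∘ collapseC false = collapseC true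
theorem collapseC_true_head (L : List (List Char)) :
    ∀ l, (collapseC true L).head? = some l → l ≠ [] := by
  induction L with
  | nil => simp [collapseC]
  | cons x rest ih =>
    by_cases hx : x = []
    · subst hx; simpa [collapseC_true_blank] using ih
    · intro l hl
      rw [collapseC_nonblank _ _ _ hx] at hl
      simp only [List.head?_cons, Option.some.injEq] at hl
      subst hl; exact hx

theorem dropLeadB_collapseC (L : List (List Char)) :
    dropLeadB (collapseC false L) = collapseC true L := by
  cases L with
  | nil => simp [collapseC, dropLeadB]
  | cons x rest =>
    by_cases hx : x = []
    · subst hx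
      rw [collapseC_false_blank, collapseC_true_blank, dropLeadB_blank_cons]
      cases h : collapseC true rest with
      | nil => simp [dropLeadB]
      | cons y ys =>
        have hy : y ≠ [] := collapseC_true_head rest y (by simp [h])
        unfold dropLeadB
        rw [List.dropWhile_cons_of_neg (by simp [isBlank, hy])]
    · rw [collapseC_nonblank _ _ _ hx, collapseC_nonblank _ _ _ hx]
      unfold dropLeadB
      rw [List.dropWhile_cons_of_neg (by simp [isBlank, hx])]

-- no paragraph produced by grpC is empty
theorem nil_not_mem_grpC (L : List (List Char)) : ∀ cur, [] ∉ grpC cur L := by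
  induction L with
  | nil =>
    intro cur
    by_cases h : cur = []
    · simp [grpC, h]
    · simp only [grpC, if_neg h]
      intro hm
      exact h (List.mem_singleton.mp hm).symm
  | cons l rest ih =>
    intro cur
    by_cases hl : l = []
    · subst hl
      by_cases hc : cur = []
      · subst hc; simpa [grpC_blank_nil] using ih []
      · intro hmem
        rw [grpC_blank cur rest hc] at hmem
        rcases List.mem_cons.mp hmem with h | h
        · exact hc h.symm
        · exact ih [] h
    · simpa [grpC_nonblank _ _ _ hl] using ih (cur ++ [l])

theorem intercalate_grp_ne_nil (G : List (List (List Char))) (hG : G ≠ []) (h : [] ∉ G) :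
    List.intercalate [[]] G ≠ [] := by
  obtain ⟨g, gs, rfl⟩ := List.exists_cons_of_ne_nil hG
  have hg : g ≠ [] := by intro e; exact h (by simp [e])
  cases gs with
  | nil => simpa [intercalate_single] using hg
  | cons g2 gs' =>
    rw [intercalate_cons_cons]
    simp

-- ---- dropTrailB step lemmas ----
theorem dropTrailB_cons_blank (X : List (List Char)) :
    dropTrailB ([] :: X) = if dropTrailB X = [] then [] else [] :: dropTrailB X := by
  unfold dropTrailB
  rw [List.reverse_cons, List.dropWhile_append]
  by_cases h : (X.reverse.dropWhile isBlank) = []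
  · rw [if_pos (by simp [h]), if_pos (by simp [h])]
    simp [isBlank]
  · rw [if_neg (by simp [h]), if_neg (by simp [h])]
    simp

theorem dropTrailB_cons_nonblank (s : List Char) (hs : s ≠ []) (X : List (List Char)) :
    dropTrailB (s :: X) = s :: dropTrailB X := by
  unfold dropTrailB
  rw [List.reverse_cons, List.dropWhile_append]
  by_cases h : (X.reverse.dropWhile isBlank) = []
  · rw [if_pos (by simp [h])]
    simp [isBlank, hs, h]
  · rw [if_neg (by simp [h])]
    simp

-- the main structural equality between the two loops' outputs
theorem collapse_grp_aux (L : List (List Char)) :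
    (dropTrailB (collapseC true L) = List.intercalate [[]] (grpC [] L)) ∧
    (∀ cur, cur ≠ [] →
      cur ++ dropTrailB (collapseC false L) = List.intercalate [[]] (grpC cur L)) := by
  induction L with
  | nil =>
    constructor
    · simp [collapseC, grpC, dropTrailB, List.intercalate]
    · intro cur hc
      simp [collapseC, grpC, hc, dropTrailB, intercalate_single]
  | cons l rest ih =>
    by_cases hl : l = []
    · subst hl
      constructor
      · rw [collapseC_true_blank, grpC_blank_nil]
        exact ih.1
      · intro cur hc
        rw [collapseC_false_blank, grpC_blank cur rest hc]
        rw [dropTrailB_cons_blank, ih.1]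
        by_cases hG : grpC [] rest = []
        · rw [hG]
          simp [List.intercalate]
        · have hI : List.intercalate [[]] (grpC [] rest) ≠ [] :=
            intercalate_grp_ne_nil _ hG (nil_not_mem_grpC rest [])
          rw [if_neg hI]
          obtain ⟨g, gs, hg⟩ := List.exists_cons_of_ne_nil hG
          rw [hg, intercalate_cons_cons]
          simp
    · constructor
      · rw [collapseC_nonblank _ _ _ hl, grpC_nonblank _ _ _ hl]
        rw [dropTrailB_cons_nonblank l hl]
        simpa using ih.2 [l] (by simp)
      · intro cur hc
        rw [collapseC_nonblank _ _ _ hl, grpC_nonblank _ _ _ hl]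
        rw [dropTrailB_cons_nonblank l hl, ← ih.2 (cur ++ [l]) (by simp)]
        simp

-- joining paragraphs separated by a blank line = joining with "\n\n"
theorem njoin_intercalate (parts : List (List (List Char))) (h : [] ∉ parts) :
    njoin (List.intercalate [[]] parts) = List.intercalate ['\n', '\n'] (parts.map njoin) := by
  induction parts with
  | nil => simp [njoin, List.intercalate]
  | cons p rest ih =>
    cases rest with
    | nil => simp [intercalate_single]
    | cons q rs =>
      have hp : p ≠ [] := by intro e; exact h (by simp [e])
      have hrest : [] ∉ q :: rs := fun hm => h (List.mem_cons_of_mem _ hm)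
      have hI : List.intercalate [[]] (q :: rs) ≠ ([] : List (List Char)) :=
        intercalate_grp_ne_nil _ (by simp) hrest
      obtain ⟨i, is, hi⟩ := List.exists_cons_of_ne_nil hI
      rw [intercalate_cons_cons, List.append_assoc,
          njoin_append p ([[]] ++ List.intercalate [[]] (q :: rs)) (by simp), if_neg hp,
          show ([[]] ++ List.intercalate [[]] (q :: rs) : List (List Char))
            = [] :: List.intercalate [[]] (q :: rs) from rfl,
          hi, njoin_cons_cons, ← hi, ih hrest]
      simp [intercalate_cons_cons]

-- the whole pipeline, at the character level
theorem core_eq (L₀ : List (List Char)) :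
    PySem.Chars.strip (njoin (collapseC false (L₀.map PySem.Chars.strip)))
      = List.intercalate ['\n', '\n'] ((grpC [] (L₀.map PySem.Chars.strip)).map njoin) := by
  have hOK : ∀ l ∈ collapseC false (L₀.map PySem.Chars.strip), headOK l ∧ lastOK l := by
    intro l hl
    rcases mem_collapseC false _ hl with rfl | hmem
    · exact ⟨headOK_nil, lastOK_nil⟩
    · obtain ⟨s, _, rfl⟩ := List.mem_map.mp hmem
      exact ⟨headOK_strip s, lastOK_strip s⟩
  rw [strip_njoin _ hOK, dropLeadB_collapseC, (collapse_grp_aux _).1,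
      njoin_intercalate _ (nil_not_mem_grpC _ [])]

-- ===== VERDICT (by name: the statement is the Claim_ definition above) =====
theorem clean_lines_spec : Claim_equal_clean_lines := by
  intro text _
  unfold Spec_clean_lines clean_lines clean_lines_alt
  have htext : (if text = "" then "" else text) = text := by
    by_cases h : text = "" <;> simp [h]
  rw [htext]
  apply String.toList_inj.mp
  rw [PySem.Str.toList_strip, PySem.Str.toList_join, PySem.Str.toList_join]
  have hA := cleanLoopA_eq ((PySem.Str.splitlines text).map PySem.Str.strip) []
  have hB := cleanLoopB_eq (PySem.Str.splitlines text) [] []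
  have hlines : ((PySem.Str.splitlines text).map PySem.Str.strip).map String.toList
      = (PySem.Chars.splitlines text.toList).map PySem.Chars.strip := by
    rw [List.map_map, ← PySem.Str.splitlines_map_toList text, List.map_map]
    congr 1
    funext s
    simp [Function.comp, PySem.Str.toList_strip]
  have hraw : (PySem.Str.splitlines text).map (fun s => PySem.Chars.strip s.toList)
      = (PySem.Chars.splitlines text.toList).map PySem.Chars.strip := by
    rw [← PySem.Str.splitlines_map_toList text, List.map_map]
    rfl
  rw [hlines] at hA
  rw [hraw] at hB
  show PySem.Chars.strip (PySem.Chars.join "\n".toList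
        ((cleanLoopA [] ((PySem.Str.splitlines text).map PySem.Str.strip)).map String.toList))
    = PySem.Chars.join "\n\n".toList _
  rw [show ("\n" : String).toList = ['\n'] from rfl,
      show ("\n\n" : String).toList = ['\n', '\n'] from rfl]
  rw [show (List.map String.toList
        ((cleanLoopB [] [] (PySem.Str.splitlines text)).map (PySem.Str.join "\n")))
      = ((cleanLoopB [] [] (PySem.Str.splitlines text)).map (List.map String.toList)).map njoin from by
        rw [List.map_map, List.map_map]
        congr 1
        funext p
        simp [Function.comp, PySem.Str.toList_join, njoin]
        rfl]
  rw [hA, hB]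
  simp only [List.map_nil, List.nil_append, List.getLast?_nil]
  exact core_eq (PySem.Chars.splitlines text.toList)
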